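-- pv_equiv track=rewrite | github.com/AmalieDue/py-multisig-hmac | multisig_hmac/multisig_hmac.py | keyIndexes
-- ===== SOURCE A (Python) =====
-- def keyIndexes(bitfield): # x should be of type int. Returns the indexes of the keys
--     xs = []
--     i = 0
--     while(bitfield > 0):
--         if(bitfield & 0x1):
--             xs.append(i)
--         bitfield >>= 1
--         i += 1
--     return xs
-- ===== SOURCE B (Python) =====
-- def keyIndexes(bitfield): # x should be of type int. Returns the indexes of the keys
--     xs = []
--     while bitfield > 0:
--         lsb = bitfield & -bitfield
--         xs.append(lsb.bit_length() - 1)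
--         bitfield -= lsb
--     return xs
-- ===== Notes on version B (the rewrite author's own statement) =====
-- stated objective: alternative
-- what changed: A scans every bit position, shifting the bitfield right one bit per iteration with a running index counter; B iterates only over the set bits, isolating each lowest set bit with bitfield & -bitfield, deriving its index from the isolated bit's bit length and clearing it by subtraction.
import Mathlib
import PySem

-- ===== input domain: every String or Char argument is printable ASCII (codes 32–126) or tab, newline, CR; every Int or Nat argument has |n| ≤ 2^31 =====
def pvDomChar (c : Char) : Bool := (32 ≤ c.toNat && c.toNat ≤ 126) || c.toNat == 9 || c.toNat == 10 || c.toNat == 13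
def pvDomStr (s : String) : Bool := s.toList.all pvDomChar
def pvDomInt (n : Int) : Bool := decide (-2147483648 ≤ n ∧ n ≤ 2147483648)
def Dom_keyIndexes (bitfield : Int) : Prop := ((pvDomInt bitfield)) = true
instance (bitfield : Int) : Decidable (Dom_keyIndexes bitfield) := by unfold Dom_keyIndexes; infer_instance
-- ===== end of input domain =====

-- B replaces A's per-position shift-and-test loop by iterating only over the SET bits
-- (isolate the lowest set bit with `bitfield & -bitfield`, read its index off its bit length,
-- clear it by subtraction); objective: a genuinely different traversal of the bitfield.

-- ===== PORT A =====
-- termination helper for the while-loop: `bitfield >>= 1` strictly shrinks a positive bitfield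
theorem pvShiftToNatLt (b : Int) (h : 0 < b) : (b >>> (1 : Int)).toNat < b.toNat := by
  cases b with
  | ofNat n =>
    have hn : n ≠ 0 := by rintro rfl; exact absurd h (by decide)
    show n >>> 1 < n
    rw [Nat.shiftRight_succ, Nat.shiftRight_zero]
    exact Nat.div_lt_self (Nat.pos_of_ne_zero hn) one_lt_two
  | negSucc n => exact absurd h (by exact of_decide_eq_false rfl)

-- `Int.land` is Python's `&` on ints (two's complement); `>>> 1` is `>>= 1`.
def keyIndexesGo (bitfield i : Int) (xs : List Int) : List Int :=
  if bitfield > 0 then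
    keyIndexesGo (bitfield >>> (1 : Int)) (i + 1)
      (xs ++ if Int.land bitfield 1 ≠ 0 then [i] else [])
  else xs
termination_by bitfield.toNat
decreasing_by exact pvShiftToNatLt bitfield (by omega)

def keyIndexes (bitfield : Int) : List Int := keyIndexesGo bitfield 0 []

-- ===== PORT B =====
-- lowest set bit of a positive Nat, as computed by Python's `bitfield & -bitfield`
def lsbNat (n : Nat) : Nat := Nat.ldiff n (n - 1)

-- port of Python's `int.bit_length()` for nonnegative ints
def bitLen (n : Nat) : Nat :=
  if n = 0 then 0 else bitLen (n / 2) + 1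
decreasing_by exact Nat.div_lt_self (Nat.pos_of_ne_zero (by omega)) one_lt_two

def pyBitLength (n : Int) : Int := Int.ofNat (bitLen n.natAbs)

-- Python's `b & -b` seen at the Nat level (helper identity, cited by the port's termination proof)
theorem pvLandNegSelf (n : Nat) (h : n ≠ 0) :
    Int.land (Int.ofNat n) (-(Int.ofNat n)) = Int.ofNat (lsbNat n) := by
  obtain ⟨k, rfl⟩ := Nat.exists_eq_succ_of_ne_zero h
  rfl

theorem pvLsbOdd (n : Nat) (h : n % 2 = 1) : lsbNat n = 1 := by
  apply Nat.eq_of_testBit_eq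
  intro i
  cases i with
  | zero =>
    show (Nat.ldiff n (n - 1)).testBit 0 = (1 : Nat).testBit 0
    rw [Nat.testBit_ldiff]
    have h1 : (n - 1) % 2 = 0 := by omega
    simp [Nat.testBit_zero, h, h1]
  | succ i =>
    show (Nat.ldiff n (n - 1)).testBit (i + 1) = (1 : Nat).testBit (i + 1)
    rw [Nat.testBit_ldiff]
    have h1 : (n - 1) / 2 = n / 2 := by omega
    simp [Nat.testBit_succ, h1, Bool.and_not_self, Nat.zero_testBit]

theorem pvLsbEven (n : Nat) (h0 : n ≠ 0) (h : n % 2 = 0) :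
    lsbNat n = 2 * lsbNat (n / 2) := by
  apply Nat.eq_of_testBit_eq
  intro i
  cases i with
  | zero =>
    show (Nat.ldiff n (n - 1)).testBit 0 = (2 * lsbNat (n / 2)).testBit 0
    rw [Nat.testBit_ldiff]
    simp [Nat.testBit_zero, h, Nat.mul_mod_right]
  | succ i =>
    show (Nat.ldiff n (n - 1)).testBit (i + 1) = (2 * lsbNat (n / 2)).testBit (i + 1)
    rw [Nat.testBit_ldiff]
    have h1 : (n - 1) / 2 = n / 2 - 1 := by omega
    have h2 : 2 * lsbNat (n / 2) / 2 = lsbNat (n / 2) := by omega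
    simp [Nat.testBit_succ, h1, lsbNat, Nat.testBit_ldiff]

theorem pvLsbPosLe (n : Nat) (h : n ≠ 0) : 0 < lsbNat n ∧ lsbNat n ≤ n := by
  induction n using Nat.strong_induction_on with
  | _ n ih =>
    rcases Nat.even_or_odd n with he | ho
    · have h2 : n % 2 = 0 := Nat.even_iff.mp he
      have hm : n / 2 ≠ 0 := by omega
      have := ih (n / 2) (by omega) hm
      rw [pvLsbEven n h h2]
      omega
    · rw [pvLsbOdd n (Nat.odd_iff.mp ho)]
      omega

-- termination helper: clearing the lowest set bit strictly shrinks a positive bitfield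
theorem pvSubLsbToNatLt (b : Int) (h : 0 < b) :
    (b - Int.land b (-b)).toNat < b.toNat := by
  cases b with
  | ofNat n =>
    have hn : n ≠ 0 := by rintro rfl; exact absurd h (by decide)
    rw [pvLandNegSelf n hn]
    have := pvLsbPosLe n hn
    show (((n : Int)) - ((lsbNat n : Int))).toNat < ((n : Int)).toNat
    omega
  | negSucc n => exact absurd h (by exact of_decide_eq_false rfl)

def keyIndexesAltGo (bitfield : Int) (xs : List Int) : List Int :=
  if bitfield > 0 then
    let lsb := Int.land bitfield (-bitfield)
    keyIndexesAltGo (bitfield - lsb) (xs ++ [pyBitLength lsb - 1])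
  else xs
termination_by bitfield.toNat
decreasing_by exact pvSubLsbToNatLt bitfield (by omega)

def keyIndexes_alt (bitfield : Int) : List Int := keyIndexesAltGo bitfield []

-- ===== PRECONDITION & SPEC =====
def Spec_keyIndexes (bitfield : Int) (out : List Int) : Prop := out = keyIndexes_alt bitfield
instance (bitfield : Int) (out : List Int) : Decidable (Spec_keyIndexes bitfield out) := by unfold Spec_keyIndexes; infer_instance

-- ===== CLAIM (what is proved, stated in full; the proofs are below) =====
def Claim_equal_keyIndexes : Prop := ∀ (bitfield : Int), Dom_keyIndexes bitfield → Spec_keyIndexes bitfield (keyIndexes bitfield)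

-- ===== LEMMAS AND PROOFS =====

-- reference list of set-bit indexes of a Nat, built A's way (shift right, count up)
def bitsA (n : Nat) : List Int :=
  if n = 0 then [] else
    (if n % 2 = 1 then [(0 : Int)] else []) ++ (bitsA (n / 2)).map (· + 1)
decreasing_by exact Nat.div_lt_self (Nat.pos_of_ne_zero (by omega)) one_lt_two

-- the same indexes built B's way (peel lowest set bit)
def bitsB (n : Nat) : List Int :=
  if h : n = 0 then [] else
    (Int.ofNat (bitLen (lsbNat n)) - 1) :: bitsB (n - lsbNat n)
decreasing_by have := pvLsbPosLe n h; omega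

theorem bitsA_zero : bitsA 0 = [] := by simp [bitsA]

theorem bitsA_two_mul (j : Nat) : bitsA (2 * j) = (bitsA j).map (· + 1) := by
  by_cases hj : j = 0
  · subst hj; simp [bitsA]
  · rw [bitsA]
    have h1 : 2 * j ≠ 0 := by omega
    have h2 : 2 * j % 2 = 0 := by omega
    have h3 : 2 * j / 2 = j := by omega
    simp [h1, h2, h3]

theorem bitLen_one : bitLen 1 = 1 := by simp [bitLen]

theorem bitLen_two_mul (x : Nat) (h : x ≠ 0) : bitLen (2 * x) = bitLen x + 1 := by
  rw [bitLen]
  have h1 : 2 * x ≠ 0 := by omega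
  have h2 : 2 * x / 2 = x := by omega
  simp [h1, h2]

-- key step: A's index list satisfies B's recurrence
theorem bitsA_peel (n : Nat) (h : n ≠ 0) :
    bitsA n = (Int.ofNat (bitLen (lsbNat n)) - 1) :: bitsA (n - lsbNat n) := by
  induction n using Nat.strong_induction_on with
  | _ n ih =>
    rcases Nat.even_or_odd n with he | ho
    · -- even case
      have h2 : n % 2 = 0 := Nat.even_iff.mp he
      have hm : n / 2 ≠ 0 := by omega
      have hlsb := pvLsbEven n h h2
      have hle := pvLsbPosLe (n / 2) hm
      have hbl : bitLen (lsbNat n) = bitLen (lsbNat (n / 2)) + 1 := by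
        rw [hlsb]; exact bitLen_two_mul _ (by omega)
      have hsub : n - lsbNat n = 2 * (n / 2 - lsbNat (n / 2)) := by omega
      have hA : bitsA n = (bitsA (n / 2)).map (· + 1) := by
        have hdup : n = 2 * (n / 2) := by omega
        conv_lhs => rw [hdup]
        exact bitsA_two_mul _
      rw [hA, ih (n / 2) (by omega) hm, hsub, bitsA_two_mul, hbl]
      simp only [List.map_cons]
      congr 1
      simp only [Int.ofNat_eq_natCast]
      push_cast
      ring
    · -- odd case
      have h2 : n % 2 = 1 := Nat.odd_iff.mp ho
      have hlsb := pvLsbOdd n h2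
      rw [hlsb, bitLen_one]
      conv_lhs => rw [bitsA]
      rw [if_neg h, if_pos h2]
      have hsub : bitsA (n - 1) = (bitsA (n / 2)).map (· + 1) := by
        have hd : n - 1 = 2 * (n / 2) := by omega
        rw [hd, bitsA_two_mul]
      rw [hsub]
      simp

theorem bitsA_eq_bitsB (n : Nat) : bitsA n = bitsB n := by
  induction n using Nat.strong_induction_on with
  | _ n ih =>
    by_cases h : n = 0
    · subst h; simp [bitsA, bitsB]
    · rw [bitsB, dif_neg h, bitsA_peel n h, ih (n - lsbNat n) (by have := pvLsbPosLe n h; omega)]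

-- bridge: A's loop computes bitsA, shifted by the running counter i
theorem keyIndexesGo_eq (n : Nat) (i : Int) (xs : List Int) :
    keyIndexesGo (Int.ofNat n) i xs = xs ++ (bitsA n).map (· + i) := by
  induction n using Nat.strong_induction_on generalizing i xs with
  | _ n ih =>
    by_cases h : n = 0
    · subst h
      rw [keyIndexesGo, if_neg (by decide), bitsA_zero]
      simp
    · have hpos : Int.ofNat n > 0 := by
        rw [Int.ofNat_eq_natCast]; exact_mod_cast Nat.pos_of_ne_zero h
      rw [keyIndexesGo, if_pos hpos]
      have hshift : (Int.ofNat n) >>> (1 : Int) = Int.ofNat (n / 2) := by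
        show Int.ofNat (n >>> 1) = Int.ofNat (n / 2)
        simp [Nat.shiftRight_succ]
      have hland : Int.land (Int.ofNat n) 1 = Int.ofNat (n % 2) := by
        show Int.ofNat (n &&& 1) = Int.ofNat (n % 2)
        rw [Nat.and_one_is_mod]
      rw [hshift, hland, ih (n / 2) (Nat.div_lt_self (Nat.pos_of_ne_zero h) one_lt_two)]
      conv_rhs => rw [bitsA]
      rw [if_neg h]
      have hmap : ((bitsA (n / 2)).map (· + 1)).map (· + i) = (bitsA (n / 2)).map (· + (i + 1)) := by
        rw [List.map_map]
        apply List.map_congr_left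
        intro x _
        show (x + 1) + i = x + (i + 1)
        omega
      by_cases hodd : n % 2 = 1
      · simp [hodd, hmap, List.append_assoc]
      · have h0 : n % 2 = 0 := by omega
        simp [h0, hmap]

-- bridge: B's loop computes bitsB
theorem keyIndexesAltGo_eq (n : Nat) (xs : List Int) :
    keyIndexesAltGo (Int.ofNat n) xs = xs ++ bitsB n := by
  induction n using Nat.strong_induction_on generalizing xs with
  | _ n ih =>
    by_cases h : n = 0
    · subst h
      rw [keyIndexesAltGo, if_neg (by decide), bitsB]
      simp
    · have hpos : Int.ofNat n > 0 := by
        rw [Int.ofNat_eq_natCast]; exact_mod_cast Nat.pos_of_ne_zero h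
      have hle := pvLsbPosLe n h
      rw [keyIndexesAltGo, if_pos hpos]
      simp only
      rw [pvLandNegSelf n h]
      have hsub : Int.ofNat n - Int.ofNat (lsbNat n) = Int.ofNat (n - lsbNat n) := by
        have hc : ((n : Int)) - ((lsbNat n : Int)) = (((n - lsbNat n : Nat)) : Int) := by omega
        exact hc
      rw [hsub, ih (n - lsbNat n) (by omega)]
      conv_rhs => rw [bitsB]
      rw [dif_neg h]
      have hbl : pyBitLength (Int.ofNat (lsbNat n)) = Int.ofNat (bitLen (lsbNat n)) := rfl
      rw [hbl]
      simp

theorem keyIndexes_neg (b : Int) (h : ¬ b > 0) : keyIndexes b = [] ∧ keyIndexes_alt b = [] := by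
  constructor
  · rw [keyIndexes, keyIndexesGo, if_neg h]
  · rw [keyIndexes_alt, keyIndexesAltGo, if_neg h]

-- ===== VERDICT (by name: the statement is the Claim_ definition above) =====
theorem keyIndexes_spec : Claim_equal_keyIndexes := by
  intro b _
  show keyIndexes b = keyIndexes_alt b
  by_cases hb : b > 0
  · cases b with
    | ofNat n =>
      rw [keyIndexes, keyIndexes_alt, keyIndexesGo_eq n 0 [], keyIndexesAltGo_eq n []]
      rw [bitsA_eq_bitsB]
      simp
    | negSucc n => exact absurd hb (by exact of_decide_eq_false rfl)
  · have := keyIndexes_neg b hb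
    rw [this.1, this.2]
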